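-- pv_equiv track=rewrite | github.com/HoodieBashoo/Squonk-Bot | Scripts/bot/twitter_helper.py | get_link_indexes
-- ===== SOURCE A (Python) =====
-- def get_link_indexes(content):
--     https_indices = []
--     search_index = 0
--     while True:
--         instance = content.find("https", search_index)
--         if instance >= 0:
--             search_index = instance + 1
--             https_indices.append(instance)
--         else:
--             break
--     return https_indices
-- ===== SOURCE B (Python) =====
-- def get_link_indexes(content):
--     return [i for i in range(len(content)) if content.startswith("https", i)]
-- ===== Notes on version B (the rewrite author's own statement) =====
-- stated objective: idiomatic
-- what changed: Replaces A's while-loop of repeated str.find calls with jumping search indices by a single comprehension that scans every position and tests startswith there.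
import Mathlib
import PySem

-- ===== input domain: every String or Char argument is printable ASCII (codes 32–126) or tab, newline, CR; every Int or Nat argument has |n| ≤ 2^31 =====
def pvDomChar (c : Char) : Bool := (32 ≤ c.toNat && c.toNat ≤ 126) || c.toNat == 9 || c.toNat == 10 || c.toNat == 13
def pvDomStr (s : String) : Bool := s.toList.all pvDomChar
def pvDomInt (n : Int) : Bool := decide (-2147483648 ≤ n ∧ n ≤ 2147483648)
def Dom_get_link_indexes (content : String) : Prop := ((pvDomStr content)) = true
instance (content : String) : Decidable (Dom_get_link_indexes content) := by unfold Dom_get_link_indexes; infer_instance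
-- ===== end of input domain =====

-- B replaces A's repeated str.find jumping loop with one per-index startswith scan (idiomatic; same result).


-- the pattern "https" as code points
def httpsPat : List Char := ['h', 't', 't', 'p', 's']

-- ===== PORT A =====
-- A's while-loop: find "https" from search_index; if found, record it and restart at index+1.
-- fuel = length+1 only guards termination; it is proved sufficient below.
def loopA (s : List Char) : Nat → Int → List Int
  | 0, _ => []
  | fuel + 1, searchIndex =>
      let inst := PySem.Chars.findFrom s httpsPat searchIndex none
      if 0 ≤ inst then inst :: loopA s fuel (inst + 1) else []

def get_link_indexes (content : String) : List Int :=
  loopA content.toList (content.toList.length + 1) 0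

-- ===== PORT B =====
-- content.startswith("https", i) for 0 ≤ i is exactly startswith on the drop at i (hand-port, exact here).
def get_link_indexes_alt (content : String) : List Int :=
  (PySem.List.pyRange 0 (PySem.Chars.len content.toList) 1).filter
    (fun i => PySem.Chars.startswith (content.toList.drop i.toNat) httpsPat)

-- ===== PRECONDITION & SPEC =====
def Spec_get_link_indexes (content : String) (out : List Int) : Prop := out = get_link_indexes_alt content
instance (content : String) (out : List Int) : Decidable (Spec_get_link_indexes content out) := by unfold Spec_get_link_indexes; infer_instance

-- ===== CLAIM (what is proved, stated in full; the proofs are below) =====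
def Claim_equal_get_link_indexes : Prop := ∀ (content : String), Dom_get_link_indexes content → Spec_get_link_indexes content (get_link_indexes content)

-- ===== LEMMAS AND PROOFS =====

-- a prefix of a later drop is an infix of an earlier drop
lemma prefix_drop_infix (s : List Char) (k i : Nat) (hk : k ≤ i)
    (h : httpsPat <+: s.drop i) : httpsPat <:+: s.drop k := by
  have hdd : s.drop i = (s.drop k).drop (i - k) := by
    rw [List.drop_drop]; congr 1; omega
  rw [hdd] at h
  exact h.isInfix.trans (List.drop_suffix _ _).isInfix

lemma loopA_eq (s : List Char) (fuel k : Nat) (hk : k ≤ s.length)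
    (hfuel : s.length + 1 - k ≤ fuel) :
    loopA s fuel (k : Int) =
      (PySem.List.pyRange (k : Int) (s.length : Int) 1).filter
        (fun i => PySem.Chars.startswith (s.drop i.toNat) httpsPat) := by
  induction fuel generalizing k with
  | zero => exfalso; omega
  | succ fuel ih =>
    by_cases hfind : 0 ≤ PySem.Chars.findFrom s httpsPat (k : Int) none
    · -- found: m = findFrom result
      obtain ⟨hkm, hpref, hmin⟩ :=
        PySem.Chars.findFrom_natCast_spec s httpsPat k hk (by omega)
      set m : Int := PySem.Chars.findFrom s httpsPat (k : Int) none with hm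
      have hstep : loopA s (fuel + 1) (k : Int) = m :: loopA s fuel (m + 1) := by
        simp only [loopA, ← hm, if_pos hfind]
      clear_value m
      have hkm' : k ≤ m.toNat := by omega
      have hMlen : m.toNat + 5 ≤ s.length := by
        have h5 := hpref.length_le
        simp only [httpsPat, List.length_cons, List.length_nil, List.length_drop] at h5
        omega
      have hmnat : m = ((m.toNat : Nat) : Int) := by omega
      rw [hstep]
      have hrec : loopA s fuel (m + 1) =
          (PySem.List.pyRange ((m.toNat + 1 : Nat) : Int) (s.length : Int) 1).filter
            (fun i => PySem.Chars.startswith (s.drop i.toNat) httpsPat) := by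
        have hfb : s.length + 1 - (m.toNat + 1) ≤ fuel := by omega
        have := ih (m.toNat + 1) (by omega) hfb
        rw [← this]; congr 1; omega
      rw [hrec]
      -- split the range at m, peel m off
      rw [PySem.List.pyRange_one_append (k : Int) m (s.length : Int) hkm (by omega),
          List.filter_append]
      rw [PySem.List.pyRange_one_cons (a := m) (b := (s.length : Int)) (by omega)]
      have hfilt1 :
          (PySem.List.pyRange (k : Int) m 1).filter
            (fun i => PySem.Chars.startswith (s.drop i.toNat) httpsPat) = [] := by
        rw [List.filter_eq_nil_iff]
        intro x hx
        rw [PySem.List.mem_pyRange_one] at hx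
        have hxm : x.toNat < m.toNat := by omega
        have hkx : k ≤ x.toNat := by omega
        intro hsw
        exact hmin x.toNat hkx hxm ((PySem.Chars.startswith_iff _ _).mp hsw)
      rw [hfilt1, List.nil_append, List.filter_cons]
      have hswm : PySem.Chars.startswith (s.drop m.toNat) httpsPat = true :=
        (PySem.Chars.startswith_iff _ _).mpr hpref
      simp only [hswm, if_pos]
      have harg : ((m.toNat + 1 : Nat) : Int) = m + 1 := by omega
      rw [harg]
    · -- not found: loop ends, no index ≥ k matches
      have hnone : ¬ httpsPat <:+: s.drop k := by
        have heq := PySem.Chars.findFrom_natCast s httpsPat k hk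
        by_cases hf : PySem.Chars.find (s.drop k) httpsPat = -1
        · rwa [PySem.Chars.find_eq_neg_one_iff] at hf
        · exfalso
          have hlb := PySem.Chars.neg_one_le_find (s.drop k) httpsPat
          rw [heq, if_neg hf] at hfind
          omega
      have hstep : loopA s (fuel + 1) (k : Int) = [] := by
        simp only [loopA, if_neg hfind]
      rw [hstep]
      symm
      rw [List.filter_eq_nil_iff]
      intro x hx
      rw [PySem.List.mem_pyRange_one] at hx
      intro hsw
      exact hnone (prefix_drop_infix s k x.toNat (by omega)
        ((PySem.Chars.startswith_iff _ _).mp hsw))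

-- ===== VERDICT (by name: the statement is the Claim_ definition above) =====
theorem get_link_indexes_spec : Claim_equal_get_link_indexes := by
  intro content _
  unfold Spec_get_link_indexes get_link_indexes get_link_indexes_alt
  have h := loopA_eq content.toList (content.toList.length + 1) 0 (by omega) (by omega)
  simpa [PySem.Chars.len_eq] using h
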